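-- pv_equiv track=rewrite | github.com/shashikanth888/python | folder1/compare_odd_even_product.py | compareProduct
-- ===== SOURCE A (Python) =====
-- def compareProduct(num: int) -> bool:
--     if num < 10:
--         return False
--     oddProdValue = 1
--     evenProdValue = 1
--     while num > 0:
--         digit = num % 10
--         oddProdValue *= digit
--         num = num // 10
--         if num == 0:
--             break
--         digit = num % 10
--         evenProdValue *= digit
--         num = num // 10
--
--     if evenProdValue == oddProdValue:
--         return True
--     return False
-- ===== SOURCE B (Python) =====
-- def _prod_every_other(ds):
--     p = 1
--     while ds:
--         p *= ds[0]
--         ds = ds[2:]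
--     return p
--
--
-- def compareProduct(num: int) -> bool:
--     if num < 10:
--         return False
--     digits = []
--     while num > 0:
--         digits.append(num % 10)
--         num //= 10
--     return _prod_every_other(digits) == _prod_every_other(digits[1:])
-- ===== Notes on version B (the rewrite author's own statement) =====
-- stated objective: simpler
-- what changed: A interleaves both running products inside one digit-extraction while-loop with a mid-loop break; B first collects the digit list (least-significant first) and then computes two independent every-other-element products over it and over its tail, comparing them.
import Mathlib
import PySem

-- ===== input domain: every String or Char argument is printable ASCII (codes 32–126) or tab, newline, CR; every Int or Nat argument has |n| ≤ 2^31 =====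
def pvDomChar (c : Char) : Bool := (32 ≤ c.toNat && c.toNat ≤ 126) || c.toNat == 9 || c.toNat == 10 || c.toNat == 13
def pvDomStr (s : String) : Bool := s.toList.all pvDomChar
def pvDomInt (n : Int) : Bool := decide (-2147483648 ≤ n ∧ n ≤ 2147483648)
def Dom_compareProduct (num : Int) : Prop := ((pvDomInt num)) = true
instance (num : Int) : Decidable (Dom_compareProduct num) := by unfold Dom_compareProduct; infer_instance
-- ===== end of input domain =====

-- B replaces A's single interleaved digit-extraction loop by building the digit list
-- once and taking two independent every-other-element products (objective: simpler decomposition).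

-- termination measure fact for the //10 loops (cited by the ports' decreasing_by)
theorem pvFdiv10_toNat_lt (n : Int) (h : 0 < n) : (Int.fdiv n 10).toNat < n.toNat := by
  rw [Int.fdiv_eq_ediv]; simp; omega

theorem pvFdiv10_pos (n : Int) (h : 0 < n) (h2 : Int.fdiv n 10 ≠ 0) : 0 < Int.fdiv n 10 := by
  rw [Int.fdiv_eq_ediv] at *; simp at *; omega

-- ===== PORT A =====
-- the `while num > 0` loop of A: two digits consumed per iteration,
-- with an early exit (`break`) when the quotient hits 0 after the first digit
def compareProductLoop (num oddProdValue evenProdValue : Int) : Bool :=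
  if h : 0 < num then
    let digit := PySem.Int.mod num 10
    let odd' := oddProdValue * digit
    let num1 := PySem.Int.floordiv num 10
    if h2 : num1 = 0 then
      -- break, then the final comparison
      evenProdValue == odd'
    else
      let digit2 := PySem.Int.mod num1 10
      let even' := evenProdValue * digit2
      compareProductLoop (PySem.Int.floordiv num1 10) odd' even'
  else
    evenProdValue == oddProdValue
termination_by num.toNat
decreasing_by
  simp only [PySem.Int.floordiv] at *
  exact Nat.lt_trans (pvFdiv10_toNat_lt _ (pvFdiv10_pos num h h2)) (pvFdiv10_toNat_lt _ h)

def compareProduct (num : Int) : Bool :=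
  if num < 10 then false
  else compareProductLoop num 1 1

-- ===== PORT B =====
-- Source B's `_prod_every_other`: p *= ds[0]; ds = ds[2:]
def prodEveryOther (ds : List Int) (p : Int) : Int :=
  match ds with
  | [] => p
  | d :: rest => prodEveryOther (rest.drop 1) (p * d)
termination_by ds.length
decreasing_by simp

-- Source B's digit-collecting while loop (append = snoc)
def collectDigits (num : Int) (acc : List Int) : List Int :=
  if h : 0 < num then
    collectDigits (PySem.Int.floordiv num 10) (acc ++ [PySem.Int.mod num 10])
  else acc
termination_by num.toNat
decreasing_by
  simp only [PySem.Int.floordiv] at *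
  exact pvFdiv10_toNat_lt _ h

def compareProduct_alt (num : Int) : Bool :=
  if num < 10 then false
  else
    let digits := collectDigits num []
    prodEveryOther digits 1 == prodEveryOther (digits.drop 1) 1

-- ===== PRECONDITION & SPEC =====
def Spec_compareProduct (num : Int) (out : Bool) : Prop := out = compareProduct_alt num
instance (num : Int) (out : Bool) : Decidable (Spec_compareProduct num out) := by unfold Spec_compareProduct; infer_instance

-- ===== CLAIM (what is proved, stated in full; the proofs are below) =====
def Claim_equal_compareProduct : Prop := ∀ (num : Int), Dom_compareProduct num → Spec_compareProduct num (compareProduct num)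

-- ===== LEMMAS AND PROOFS =====

-- product of the digits at even positions (0, 2, 4, …) of the list
def pOdd (ds : List Int) : Int :=
  match ds with
  | [] => 1
  | d :: rest => d * pOdd (rest.drop 1)
termination_by ds.length
decreasing_by simp

theorem prodEveryOther_eq (ds : List Int) : ∀ (p : Int),
    prodEveryOther ds p = p * pOdd ds := by
  induction ds using pOdd.induct with
  | case1 => intro p; simp [prodEveryOther, pOdd]
  | case2 d rest ih =>
    intro p
    rw [prodEveryOther, pOdd, ih, mul_assoc]

theorem collectDigits_acc (num : Int) (acc : List Int) :
    collectDigits num acc = acc ++ collectDigits num [] := by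
  by_cases h : 0 < num
  · conv_lhs => rw [collectDigits]
    conv_rhs => rw [collectDigits]
    simp only [h, dite_true]
    simp only [List.nil_append]
    rw [collectDigits_acc (PySem.Int.floordiv num 10) (acc ++ [PySem.Int.mod num 10]),
        collectDigits_acc (PySem.Int.floordiv num 10) [PySem.Int.mod num 10]]
    simp
  · conv_lhs => rw [collectDigits]
    conv_rhs => rw [collectDigits]
    simp [h]
termination_by num.toNat
decreasing_by
  all_goals
    simp only [PySem.Int.floordiv] at *
    exact pvFdiv10_toNat_lt _ h

theorem collectDigits_cons (num : Int) (h : 0 < num) :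
    collectDigits num [] =
      PySem.Int.mod num 10 :: collectDigits (PySem.Int.floordiv num 10) [] := by
  conv_lhs => rw [collectDigits]
  simp only [h, dite_true, List.nil_append]
  exact collectDigits_acc _ _

theorem collectDigits_nil (num : Int) (h : ¬ 0 < num) :
    collectDigits num [] = [] := by
  rw [collectDigits]; simp [h]

theorem compareProductLoop_eq (num odd even : Int) :
    compareProductLoop num odd even =
      ((even * pOdd ((collectDigits num []).drop 1)) == (odd * pOdd (collectDigits num []))) := by
  by_cases h : 0 < num
  · rw [compareProductLoop, collectDigits_cons num h]
    simp only [h, dite_true]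
    by_cases hq : PySem.Int.floordiv num 10 = 0
    · simp only [hq, dite_true]
      rw [collectDigits_nil 0 (by omega)]
      simp [pOdd, mul_comm]
    · simp only [hq, dite_false]
      have h1 : 0 < PySem.Int.floordiv num 10 := by
        simp only [PySem.Int.floordiv] at *
        exact pvFdiv10_pos num h hq
      rw [collectDigits_cons _ h1,
          compareProductLoop_eq (PySem.Int.floordiv (PySem.Int.floordiv num 10) 10)]
      simp [pOdd, mul_assoc]
  · rw [compareProductLoop, collectDigits_nil num h]
    simp [h, pOdd]
termination_by num.toNat
decreasing_by
  simp only [PySem.Int.floordiv] at *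
  exact Nat.lt_trans (pvFdiv10_toNat_lt _ h1) (pvFdiv10_toNat_lt _ h)

theorem int_beq_comm (a b : Int) : (a == b) = (b == a) := by
  by_cases h : a = b
  · simp [h]
  · simp [h, Ne.symm h]

-- ===== VERDICT (by name: the statement is the Claim_ definition above) =====
theorem compareProduct_spec : Claim_equal_compareProduct := by
  intro num _
  unfold Spec_compareProduct compareProduct compareProduct_alt
  by_cases h : num < 10
  · simp [h]
  · simp only [h, if_false]
    rw [compareProductLoop_eq, int_beq_comm, prodEveryOther_eq, prodEveryOther_eq]
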